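-- pv_equiv track=rewrite | github.com/YostLabs/3SpaceSuite-Python | src/data_file.py | validate_axis_order
-- ===== SOURCE A (Python) =====
-- def validate_axis_order(order: str):
--     valid_chars = set("-xyz")
--     required_chars = set('xyz')
--     order = order.lower()
--     for char in order:
--         if len(required_chars) == 0 or char not in valid_chars: return False #Still processing when nothing left to or an invalid character
--         valid_chars.remove(char)
--         if char in required_chars: required_chars.remove(char)
--         if char != '-': valid_chars.add('-') #After a non -, a - is allowed again
--
--     return len(required_chars) == 0
-- ===== SOURCE B (Python) =====
-- def validate_axis_order(order: str):
--     # Single pass with a dash-pending flag, collecting the axis letters,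
--     # then one final sorted comparison against ['x', 'y', 'z'].
--     order = order.lower()
--     letters = []
--     dash = False
--     for c in order:
--         if c == '-':
--             if dash:
--                 return False
--             dash = True
--         elif c in ('x', 'y', 'z'):
--             letters.append(c)
--             dash = False
--         else:
--             return False
--     if dash:
--         return False
--     return sorted(letters) == ['x', 'y', 'z']
-- ===== Notes on version B (the rewrite author's own statement) =====
-- stated objective: simpler
-- what changed: Replaces A's mutable valid/required set bookkeeping (remove/re-add '-' per char) with a single pass that only tracks a dash-pending flag and collects the axis letters, deciding at the end with sorted(letters) == ['x','y','z'].
import Mathlib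
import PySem

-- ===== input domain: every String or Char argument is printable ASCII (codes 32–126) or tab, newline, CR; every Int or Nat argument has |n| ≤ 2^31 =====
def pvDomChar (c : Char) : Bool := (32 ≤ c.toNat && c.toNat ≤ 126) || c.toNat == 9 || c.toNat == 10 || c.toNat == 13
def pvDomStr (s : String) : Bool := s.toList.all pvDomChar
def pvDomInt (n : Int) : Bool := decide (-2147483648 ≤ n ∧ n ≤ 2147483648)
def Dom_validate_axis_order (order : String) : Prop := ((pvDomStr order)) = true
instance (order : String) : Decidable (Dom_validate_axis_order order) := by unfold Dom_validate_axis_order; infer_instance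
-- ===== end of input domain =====

-- B replaces A's mutable valid/required set bookkeeping with a one-pass dash-pending
-- flag plus a final sorted-letters comparison (objective: simpler; same return value).


-- ===== PORT A =====
-- the for-loop with early returns, carrying the two Python sets
def pvALoop : List Char → PySem.Set Char → PySem.Set Char → Bool
  | [], _valid, required => PySem.Set.len required == 0
  | c :: rest, valid, required =>
    if PySem.Set.len required == 0 || !(PySem.Set.contains valid c) then false
    else
      -- valid_chars.remove(char): membership was just checked by the guard, so discard is exact
      let valid1 := PySem.Set.discard valid c
      let required1 := if PySem.Set.contains required c then PySem.Set.discard required c else required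
      let valid2 := if c != '-' then PySem.Set.add valid1 '-' else valid1
      pvALoop rest valid2 required1

def validate_axis_order (order : String) : Bool :=
  pvALoop (PySem.Str.lower order).toList
    (PySem.Set.ofList "-xyz".toList) (PySem.Set.ofList "xyz".toList)

-- ===== PORT B =====
-- the for-loop with early returns, carrying the collected letters and the dash-pending flag
def pvBLoop : List Char → List Char → Bool → Bool
  | [], letters, dash =>
      if dash then false
      else PySem.List.sorted letters (fun x => x) false == ['x', 'y', 'z']
  | c :: rest, letters, dash =>
      if c == '-' then
        if dash then false else pvBLoop rest letters true
      else if c == 'x' || c == 'y' || c == 'z' then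
        pvBLoop rest (letters ++ [c]) false
      else false

def validate_axis_order_alt (order : String) : Bool :=
  pvBLoop (PySem.Str.lower order).toList [] false

-- ===== PRECONDITION & SPEC =====
def Spec_validate_axis_order (order : String) (out : Bool) : Prop := out = validate_axis_order_alt order
instance (order : String) (out : Bool) : Decidable (Spec_validate_axis_order order out) := by unfold Spec_validate_axis_order; infer_instance

-- ===== CLAIM (what is proved, stated in full; the proofs are below) =====
def Claim_equal_validate_axis_order : Prop := ∀ (order : String), Dom_validate_axis_order order → Spec_validate_axis_order order (validate_axis_order order)

-- ===== LEMMAS AND PROOFS =====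

def pvXYZ (a : Char) : Prop := a = 'x' ∨ a = 'y' ∨ a = 'z'

-- once the collected letters cannot be a permutation of x,y,z, B is doomed to False
lemma pvBLoop_bad (cs : List Char) : ∀ (letters : List Char) (dash : Bool),
    (¬ letters.Nodup ∨ 3 < letters.length) → pvBLoop cs letters dash = false := by
  induction cs with
  | nil =>
    intro letters dash h
    simp only [pvBLoop]
    split
    · rfl
    · rw [beq_eq_false_iff_ne]
      intro heq
      have hperm : letters.Perm ['x', 'y', 'z'] :=
        (PySem.List.sorted_perm (xs := letters) (key := fun x => x) (rev := false)).symm.trans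
          (heq ▸ List.Perm.refl _)
      rcases h with h | h
      · exact h (hperm.nodup_iff.mpr (by decide))
      · have := hperm.length_eq
        simp at this
        omega
  | cons c rest ih =>
    intro letters dash h
    simp only [pvBLoop]
    split
    · split
      · rfl
      · exact ih letters true h
    · split
      · apply ih
        rcases h with h | h
        · left; intro hn; exact h (hn.sublist (List.sublist_append_left _ _))
        · right; simp; omega
      · rfl

lemma pvBLoop_full_dash (cs : List Char) : ∀ (letters : List Char),
    letters.length = 3 → pvBLoop cs letters true = false := by
  induction cs with
  | nil => intro letters _; simp [pvBLoop]
  | cons c rest ih =>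
    intro letters hl
    simp only [pvBLoop]
    split
    · rfl
    · split
      · exact pvBLoop_bad rest _ false (Or.inr (by simp [hl]))
      · rfl

lemma pvBLoop_full (c : Char) (cs : List Char) (letters : List Char) (dash : Bool)
    (hl : letters.length = 3) : pvBLoop (c :: cs) letters dash = false := by
  simp only [pvBLoop]
  split
  · split
    · rfl
    · exact pvBLoop_full_dash cs letters hl
  · split
    · exact pvBLoop_bad cs _ false (Or.inr (by simp [hl]))
    · rfl

lemma pvLen0 (s : PySem.Set Char) (m : Char) (hm : m ∈ s) : (PySem.Set.len s == 0) = false := by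
  have hne : s ≠ [] := by intro h; subst h; simp at hm
  simp [PySem.Set.len, List.length_eq_zero_iff, hne]

-- main simulation invariant: A's two sets are determined (as sets) by B's letters and flag
lemma pvMain (cs : List Char) : ∀ (valid required letters : List Char) (dash : Bool),
    letters.Nodup →
    (∀ a ∈ letters, pvXYZ a) →
    (dash = true → ¬('x' ∈ letters ∧ 'y' ∈ letters ∧ 'z' ∈ letters)) →
    (∀ a, a ∈ valid ↔ (pvXYZ a ∧ a ∉ letters) ∨ (a = '-' ∧ dash = false)) →
    (∀ a, a ∈ required ↔ pvXYZ a ∧ a ∉ letters) →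
    pvALoop cs valid required = pvBLoop cs letters dash := by
  induction cs with
  | nil =>
    intro valid required letters dash hnd hsub hdash hvalid hreq
    simp only [pvALoop, pvBLoop]
    by_cases hd : dash = true
    · rw [hd]
      simp only [if_true]
      obtain ⟨m, hmx, hmn⟩ : ∃ m, pvXYZ m ∧ m ∉ letters := by
        have h := hdash hd
        by_cases hx : 'x' ∈ letters
        · by_cases hy : 'y' ∈ letters
          · exact ⟨'z', by simp [pvXYZ], fun hz => h ⟨hx, hy, hz⟩⟩
          · exact ⟨'y', by simp [pvXYZ], hy⟩
        · exact ⟨'x', by simp [pvXYZ], hx⟩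
      exact pvLen0 required m ((hreq m).mpr ⟨hmx, hmn⟩)
    · have hdf : dash = false := Bool.eq_false_iff.mpr hd
      simp only [hdf, Bool.false_eq_true, if_false]
      by_cases hcov : 'x' ∈ letters ∧ 'y' ∈ letters ∧ 'z' ∈ letters
      · have hperm : List.Perm ['x', 'y', 'z'] letters := by
          rw [List.perm_ext_iff_of_nodup (by decide) hnd]
          intro a
          constructor
          · intro ha
            simp only [List.mem_cons, List.not_mem_nil, or_false] at ha
            rcases ha with h | h | h <;> rw [h] <;> tauto
          · intro ha
            rcases hsub a ha with h | h | h <;> simp [h]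
        have hsorted : PySem.List.sorted letters (fun x => x) = ['x', 'y', 'z'] :=
          PySem.List.sorted_eq_of_perm_of_pairwise_lt letters ['x', 'y', 'z'] _ hperm (by decide)
        have hrnil : required = [] := by
          rw [List.eq_nil_iff_forall_not_mem]
          intro a ha
          rcases (hreq a).mp ha with ⟨hx, hn⟩
          rcases hx with h | h | h <;> subst h <;> tauto
        rw [hrnil, hsorted]
        decide
      · obtain ⟨m, hmx, hmn⟩ : ∃ m, pvXYZ m ∧ m ∉ letters := by
          by_cases hx : 'x' ∈ letters
          · by_cases hy : 'y' ∈ letters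
            · exact ⟨'z', by simp [pvXYZ], fun hz => hcov ⟨hx, hy, hz⟩⟩
            · exact ⟨'y', by simp [pvXYZ], hy⟩
          · exact ⟨'x', by simp [pvXYZ], hx⟩
        rw [pvLen0 required m ((hreq m).mpr ⟨hmx, hmn⟩)]
        rw [eq_comm, beq_eq_false_iff_ne]
        intro heq
        have hperm : letters.Perm ['x', 'y', 'z'] :=
          (PySem.List.sorted_perm (xs := letters) (key := fun x => x) (rev := false)).symm.trans
            (heq ▸ List.Perm.refl _)
        have : m ∈ letters := by
          rw [hperm.mem_iff]
          rcases hmx with h | h | h <;> simp [h]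
        exact hmn this
  | cons c rest ih =>
    intro valid required letters dash hnd hsub hdash hvalid hreq
    by_cases hcov : 'x' ∈ letters ∧ 'y' ∈ letters ∧ 'z' ∈ letters
    · have hperm : List.Perm ['x', 'y', 'z'] letters := by
        rw [List.perm_ext_iff_of_nodup (by decide) hnd]
        intro a
        constructor
        · intro ha
          simp only [List.mem_cons, List.not_mem_nil, or_false] at ha
          rcases ha with h | h | h <;> rw [h] <;> tauto
        · intro ha
          rcases hsub a ha with h | h | h <;> simp [h]
      have hlen : letters.length = 3 := by
        have := hperm.length_eq
        simpa using this.symm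
      rw [pvBLoop_full c rest letters dash hlen]
      have hrnil : required = [] := by
        rw [List.eq_nil_iff_forall_not_mem]
        intro a ha
        rcases (hreq a).mp ha with ⟨hx, hn⟩
        rcases hx with h | h | h <;> rw [h] at hn <;> tauto
      simp [pvALoop, hrnil, PySem.Set.len]
    · obtain ⟨m, hmx, hmn⟩ : ∃ m, pvXYZ m ∧ m ∉ letters := by
        by_cases hx : 'x' ∈ letters
        · by_cases hy : 'y' ∈ letters
          · exact ⟨'z', by simp [pvXYZ], fun hz => hcov ⟨hx, hy, hz⟩⟩
          · exact ⟨'y', by simp [pvXYZ], hy⟩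
        · exact ⟨'x', by simp [pvXYZ], hx⟩
      have hlen0 := pvLen0 required m ((hreq m).mpr ⟨hmx, hmn⟩)
      by_cases hc : c ∈ valid
      · have hcont : PySem.Set.contains valid c = true := (PySem.Set.contains_iff valid c).mpr hc
        simp only [pvALoop, pvBLoop, hlen0, hcont, Bool.not_true, Bool.or_false]
        rcases (hvalid c).mp hc with ⟨hcx, hcn⟩ | ⟨hcd, hdf⟩
        · -- c is a fresh axis letter
          have hcne : c ≠ '-' := by rcases hcx with h | h | h <;> simp [h]
          have hrc : PySem.Set.contains required c = true :=
            (PySem.Set.contains_iff required c).mpr ((hreq c).mpr ⟨hcx, hcn⟩)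
          have hbne : (c == '-') = false := by simp [hcne]
          have hbx : (c == 'x' || c == 'y' || c == 'z') = true := by
            rcases hcx with h | h | h <;> simp [h]
          simp only [hrc, if_true, hbne, Bool.false_eq_true, if_false, hbx, bne,
            Bool.not_false, if_true]
          apply ih
          · exact ((List.perm_append_singleton c letters).nodup_iff).mpr
              (List.nodup_cons.mpr ⟨hcn, hnd⟩)
          · intro a ha
            rcases List.mem_append.mp ha with h | h
            · exact hsub a h
            · simp at h; subst h; exact hcx
          · simp
          · intro a
            simp only [PySem.Set.mem_add, PySem.Set.mem_discard, hvalid a, List.mem_append,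
              List.mem_singleton]
            constructor
            · rintro (⟨⟨hx, hn⟩ | ⟨he, _⟩, hne⟩ | he)
              · exact Or.inl ⟨hx, by tauto⟩
              · exact Or.inr ⟨he, by simp⟩
              · exact Or.inr ⟨he, by simp⟩
            · rintro (⟨hx, hn⟩ | ⟨he, _⟩)
              · rw [not_or] at hn
                exact Or.inl ⟨Or.inl ⟨hx, hn.1⟩, hn.2⟩
              · exact Or.inr he
          · intro a
            simp only [PySem.Set.mem_discard, hreq a, List.mem_append, List.mem_singleton]
            constructor
            · rintro ⟨⟨hx, hn⟩, hne⟩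
              exact ⟨hx, by tauto⟩
            · rintro ⟨hx, hn⟩
              rw [not_or] at hn
              exact ⟨⟨hx, hn.1⟩, hn.2⟩
        · -- c = '-', dash was False
          subst hcd
          have hrc : PySem.Set.contains required '-' = false := by
            rw [Bool.eq_false_iff]
            intro h
            rcases (hreq '-').mp ((PySem.Set.contains_iff required '-').mp h) with ⟨hx, _⟩
            rcases hx with h | h | h <;> simp at h
          simp only [hrc, Bool.false_eq_true, if_false, bne_self_eq_false, Bool.false_eq_true,
            if_false, BEq.rfl, if_true, hdf, Bool.false_eq_true, if_false, if_true]
          apply ih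
          · exact hnd
          · exact hsub
          · intro _; exact hcov
          · intro a
            simp only [PySem.Set.mem_discard, hvalid a]
            constructor
            · rintro ⟨⟨hx, hn⟩ | ⟨he, _⟩, hne⟩
              · exact Or.inl ⟨hx, hn⟩
              · exact absurd he hne
            · rintro (⟨hx, hn⟩ | ⟨_, h⟩)
              · refine ⟨Or.inl ⟨hx, hn⟩, ?_⟩
                rcases hx with h | h | h <;> simp [h]
              · simp at h
          · exact hreq
      · have hcont : PySem.Set.contains valid c = false := by
          rw [Bool.eq_false_iff]
          intro h
          exact hc ((PySem.Set.contains_iff valid c).mp h)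
        have hA : pvALoop (c :: rest) valid required = false := by
          simp only [pvALoop, hlen0, hcont, Bool.not_false, Bool.or_true, if_true]
        rw [hA]
        by_cases hcd : c = '-'
        · subst hcd
          have hdt : dash = true := by
            rcases Bool.eq_false_or_eq_true dash with h | h
            · exact h
            · exact absurd ((hvalid '-').mpr (Or.inr ⟨rfl, h⟩)) hc
          simp [pvBLoop, hdt]
        · by_cases hcx : pvXYZ c
          · have hcl : c ∈ letters := by
              by_contra hn
              exact hc ((hvalid c).mpr (Or.inl ⟨hcx, hn⟩))
            have hbne : (c == '-') = false := by simp [hcd]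
            have hbx : (c == 'x' || c == 'y' || c == 'z') = true := by
              rcases hcx with h | h | h <;> simp [h]
            simp only [pvBLoop, hbne, Bool.false_eq_true, if_false, hbx, if_true]
            rw [pvBLoop_bad rest (letters ++ [c]) false]
            left
            intro hn
            have hcons : (c :: letters).Nodup :=
              (List.perm_append_singleton c letters).nodup_iff.mp hn
            exact (List.nodup_cons.mp hcons).1 hcl
          · have hbne : (c == '-') = false := by simp [hcd]
            have hbx : (c == 'x' || c == 'y' || c == 'z') = false := by
              simp only [Bool.or_eq_false_iff, beq_eq_false_iff_ne]
              refine ⟨⟨?_, ?_⟩, ?_⟩ <;> intro h <;> exact hcx (by simp [pvXYZ, h])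
            simp [pvBLoop, hbne, hbx]

-- ===== VERDICT (by name: the statement is the Claim_ definition above) =====
theorem validate_axis_order_spec : Claim_equal_validate_axis_order := by
  intro order _
  unfold Spec_validate_axis_order validate_axis_order validate_axis_order_alt
  apply pvMain
  · exact List.nodup_nil
  · intro a h; exact absurd h (List.not_mem_nil)
  · intro h; simp at h
  · intro a
    constructor
    · intro h; simp [PySem.Set.mem_ofList] at h
      rcases h with h | h | h | h <;> simp [pvXYZ, h]
    · intro h
      rcases h with ⟨h, _⟩ | ⟨h, _⟩ <;> simp [PySem.Set.mem_ofList]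
      · rcases h with h | h | h <;> simp [h]
      · simp [h]
  · intro a
    constructor
    · intro h; simp [PySem.Set.mem_ofList] at h
      rcases h with h | h | h <;> simp [pvXYZ, h]
    · intro ⟨h, _⟩
      rcases h with h | h | h <;> simp [PySem.Set.mem_ofList, h]
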